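-- pv_equiv track=rewrite | github.com/ZTE-AICloud/TeleCom-Bench | code/opencompass/datasets/zte_domain/IDA/parameter_extract.py | _list_substring_match
-- ===== SOURCE A (Python) =====
-- def _list_substring_match(ref_list: list, pred_list: list) -> bool:
--     """判断ref_list中的每个元素是否是pred_list中某个元素的子串"""
--     if not isinstance(ref_list, list) or not isinstance(pred_list, list):
--         return False
--     if len(ref_list) == 0:
--         return len(pred_list) == 0
--
--     # 对于ref_list中的每个元素，检查是否在pred_list的某个元素中作为子串出现
--     for ref_item in ref_list:
--         ref_str = str(ref_item).strip()
--         if not ref_str:  # 空字符串跳过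
--             continue
--         found = False
--         for pred_item in pred_list:
--             pred_str = str(pred_item).strip()
--             if ref_str in pred_str:
--                 found = True
--                 break
--         if not found:
--             return False
--     return True
-- ===== SOURCE B (Python) =====
-- def _list_substring_match(ref_list: list, pred_list: list) -> bool:
--     """判断ref_list中的每个元素是否是pred_list中某个元素的子串"""
--     if not isinstance(ref_list, list) or not isinstance(pred_list, list):
--         return False
--     if not ref_list:
--         return not pred_list
--     # pred-outer sweep: keep the set of still-unmatched stripped refs and
--     # shrink it with each pred; succeed as soon as nothing is left pending.
--     pending = [r for r in (str(x).strip() for x in ref_list) if r]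
--     for pred_item in pred_list:
--         if not pending:
--             break
--         pred_str = str(pred_item).strip()
--         pending = [r for r in pending if r not in pred_str]
--     return not pending
-- ===== Notes on version B (the rewrite author's own statement) =====
-- stated objective: alternative
-- what changed: Replaced A's ref-outer nested scan (inner loop over preds with a found flag per ref) by a pred-outer sweep that pre-strips all refs once and maintains a shrinking list of still-unmatched refs, breaking early once it is empty.
import Mathlib
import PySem

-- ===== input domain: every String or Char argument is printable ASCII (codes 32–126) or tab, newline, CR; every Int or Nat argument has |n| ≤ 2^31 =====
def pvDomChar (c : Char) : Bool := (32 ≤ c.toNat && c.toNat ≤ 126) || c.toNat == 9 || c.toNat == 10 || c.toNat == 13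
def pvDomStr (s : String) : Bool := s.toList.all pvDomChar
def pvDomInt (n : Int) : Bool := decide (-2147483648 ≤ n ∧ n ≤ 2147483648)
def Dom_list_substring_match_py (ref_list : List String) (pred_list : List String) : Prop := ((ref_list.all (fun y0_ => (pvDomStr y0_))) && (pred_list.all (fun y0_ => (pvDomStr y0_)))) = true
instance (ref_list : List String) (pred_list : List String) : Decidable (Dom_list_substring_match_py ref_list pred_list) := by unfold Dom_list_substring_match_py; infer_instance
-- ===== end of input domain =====

-- B replaces A's ref-outer nested scan by a pred-outer sweep over a shrinking list of
-- still-unmatched stripped refs (objective: alternative decomposition, same worst-case cost).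

-- ===== PORT A =====
-- inner 'for pred_item in pred_list: … found = True; break' loop of A
def lsmInner (ref_str : String) : List String → Bool
  | [] => false
  | pred_item :: rest =>
    if PySem.Str.isIn ref_str (PySem.Str.strip pred_item) then true
    else lsmInner ref_str rest

-- outer 'for ref_item in ref_list' loop of A
def lsmLoop : List String → List String → Bool
  | [], _ => true
  | ref_item :: rest, pred_list =>
    let ref_str := PySem.Str.strip ref_item
    if ref_str = "" then lsmLoop rest pred_list
    else if lsmInner ref_str pred_list then lsmLoop rest pred_list
    else false

def list_substring_match_py (ref_list : List String) (pred_list : List String) : Bool :=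
  if ref_list.length = 0 then pred_list.length == 0
  else lsmLoop ref_list pred_list

-- ===== PORT B =====
-- 'for pred_item in pred_list: if not pending: break; pending = [r for r in pending if r not in pred_str]'
def lsmSweep : List String → List String → List String
  | pending, [] => pending
  | pending, pred_item :: rest =>
    if pending.isEmpty then pending
    else lsmSweep (pending.filter (fun r => !PySem.Str.isIn r (PySem.Str.strip pred_item))) rest

def list_substring_match_py_alt (ref_list : List String) (pred_list : List String) : Bool :=
  if ref_list.isEmpty then pred_list.isEmpty
  else
    let pending := ((ref_list.map PySem.Str.strip).filter (fun r => r != ""))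
    (lsmSweep pending pred_list).isEmpty

-- ===== PRECONDITION & SPEC =====
def Spec_list_substring_match_py (ref_list : List String) (pred_list : List String) (out : Bool) : Prop := out = list_substring_match_py_alt ref_list pred_list
instance (ref_list : List String) (pred_list : List String) (out : Bool) : Decidable (Spec_list_substring_match_py ref_list pred_list out) := by unfold Spec_list_substring_match_py; infer_instance

-- ===== CLAIM (what is proved, stated in full; the proofs are below) =====
def Claim_equal_list_substring_match_py : Prop := ∀ (ref_list : List String) (pred_list : List String), Dom_list_substring_match_py ref_list pred_list → Spec_list_substring_match_py ref_list pred_list (list_substring_match_py ref_list pred_list)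

-- ===== LEMMAS AND PROOFS =====

lemma lsmInner_eq_any (r : String) (ps : List String) :
    lsmInner r ps = ps.any (fun p => PySem.Str.isIn r (PySem.Str.strip p)) := by
  induction ps with
  | nil => rfl
  | cons p rest ih =>
    unfold lsmInner
    cases hx : PySem.Str.isIn r (PySem.Str.strip p)
    · rw [if_neg (by simp)]
      simp only [List.any_cons, hx, Bool.false_or, ih]
    · rw [if_pos rfl]
      simp only [List.any_cons, hx, Bool.true_or]

lemma lsmLoop_eq_all (ps : List String) : ∀ rs : List String,
    lsmLoop rs ps = rs.all (fun r => (PySem.Str.strip r == "") || lsmInner (PySem.Str.strip r) ps) := by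
  intro rs
  induction rs with
  | nil => rfl
  | cons r rest ih =>
    simp only [lsmLoop, List.all_cons, ih]
    by_cases h : PySem.Str.strip r = "" <;> simp only [h, if_pos, if_neg,
      beq_self_eq_true, Bool.true_or, not_false_iff]
    · rfl
    · simp only [show (PySem.Str.strip r == "") = false by simp [h], Bool.false_or]
      split_ifs with h2 <;> simp [h2]

lemma lsmSweep_eq_filter (ps : List String) : ∀ pending : List String,
    lsmSweep pending ps =
      pending.filter (fun r => !ps.any (fun p => PySem.Str.isIn r (PySem.Str.strip p))) := by
  induction ps with
  | nil => intro pending; simp [lsmSweep]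
  | cons p rest ih =>
    intro pending
    by_cases h : pending.isEmpty
    · simp_all [lsmSweep, List.isEmpty_iff]
    · simp only [lsmSweep, h, if_neg, Bool.false_eq_true, not_false_iff, ih,
        List.filter_filter]
      apply List.filter_congr
      intro x _
      simp [Bool.not_or, Bool.and_comm]

-- ===== VERDICT (the statement is the Claim_ definition above) =====
theorem list_substring_match_py_spec : Claim_equal_list_substring_match_py := by
  intro refs preds _
  unfold Spec_list_substring_match_py list_substring_match_py list_substring_match_py_alt
  by_cases h : refs = []
  · subst h; cases preds <;> simp
  · simp only [List.isEmpty_iff, h, List.length_eq_zero_iff, ite_false]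
    rw [lsmLoop_eq_all, lsmSweep_eq_filter, Bool.eq_iff_iff]
    simp only [List.all_eq_true, List.isEmpty_iff, List.filter_eq_nil_iff, List.mem_filter,
      List.mem_map, lsmInner_eq_any, Bool.or_eq_true, beq_iff_eq, bne_iff_ne, ne_eq,
      Bool.not_eq_true', Bool.not_eq_false, List.any_eq_true]
    constructor
    · rintro H x ⟨⟨r, hr, rfl⟩, hne⟩
      rcases H r hr with h1 | h1
      · exact absurd h1 hne
      · exact h1
    · intro H r hr
      by_cases he : PySem.Str.strip r = ""
      · exact Or.inl he
      · exact Or.inr (H _ ⟨⟨r, hr, rfl⟩, he⟩)
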